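-- pv_equiv track=rewrite | github.com/juiceHN/proyecto1IA | discretizar.py | borders
-- ===== SOURCE A (Python) =====
-- def borders(sizeN):
-- 	noUp=[]
-- 	noRight=[]
-- 	noDown=[]
-- 	noLeft=[]
-- 	for i in range(sizeN):
-- 		noLeft.append(i*sizeN)
-- 		noRight.append((sizeN-1)+i*sizeN)
--
-- 	for i in range(sizeN**2):
-- 		if i < sizeN:
-- 			noUp.append(i)
-- 		if i <= (sizeN**2)-1 and i>= (sizeN**2) - sizeN:
-- 			noDown.append(i)
-- 	return noUp, noRight, noDown, noLeft
-- ===== SOURCE B (Python) =====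
-- def borders(sizeN):
--     if sizeN <= 0:
--         return [], [], [], []
--     n2 = sizeN * sizeN
--     noUp = list(range(sizeN))
--     noRight = list(range(sizeN - 1, n2, sizeN))
--     noDown = list(range(n2 - sizeN, n2))
--     noLeft = list(range(0, n2, sizeN))
--     return noUp, noRight, noDown, noLeft
-- ===== Notes on version B (the rewrite author's own statement) =====
-- stated objective: faster
-- what changed: B computes each of the four border lists directly as an arithmetic range (O(N) total) instead of A's scan over all N^2 cell indices with per-cell membership tests.
import Mathlib
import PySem

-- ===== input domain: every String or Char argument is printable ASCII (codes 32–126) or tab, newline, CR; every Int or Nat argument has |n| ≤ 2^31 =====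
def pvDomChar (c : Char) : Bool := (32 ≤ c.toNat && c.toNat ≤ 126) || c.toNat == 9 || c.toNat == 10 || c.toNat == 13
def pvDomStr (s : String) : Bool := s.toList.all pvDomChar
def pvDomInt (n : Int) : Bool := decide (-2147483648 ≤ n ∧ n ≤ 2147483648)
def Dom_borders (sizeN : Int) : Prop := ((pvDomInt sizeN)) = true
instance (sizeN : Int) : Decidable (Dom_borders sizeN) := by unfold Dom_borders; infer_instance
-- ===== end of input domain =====

-- B generates the four border-index lists directly with ranges (O(N)) instead of scanning all N^2 cells; return-value equivalence.

-- ===== PORT A =====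
-- literal transliteration: two appended-to pairs of accumulators, one per Python loop
def borders (sizeN : Int) : List Int × List Int × List Int × List Int :=
  -- for i in range(sizeN): noLeft.append(i*sizeN); noRight.append((sizeN-1)+i*sizeN)
  let st1 := (PySem.List.pyRange 0 sizeN 1).foldl
      (fun (st : List Int × List Int) i => (st.1 ++ [i * sizeN], st.2 ++ [(sizeN - 1) + i * sizeN]))
      ([], [])
  -- for i in range(sizeN**2): if i < sizeN: noUp.append(i); if i <= n2-1 and i >= n2-sizeN: noDown.append(i)
  let st2 := (PySem.List.pyRange 0 (sizeN ^ 2) 1).foldl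
      (fun (st : List Int × List Int) i =>
        let st := if i < sizeN then (st.1 ++ [i], st.2) else st
        if i ≤ sizeN ^ 2 - 1 ∧ sizeN ^ 2 - sizeN ≤ i then (st.1, st.2 ++ [i]) else st)
      ([], [])
  (st2.1, st1.2, st2.2, st1.1)

-- ===== PORT B =====
def borders_alt (sizeN : Int) : List Int × List Int × List Int × List Int :=
  if sizeN ≤ 0 then ([], [], [], [])
  else
    let n2 := sizeN * sizeN
    (PySem.List.pyRange 0 sizeN 1,
     PySem.List.pyRange (sizeN - 1) n2 sizeN,
     PySem.List.pyRange (n2 - sizeN) n2 1,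
     PySem.List.pyRange 0 n2 sizeN)

-- ===== PRECONDITION & SPEC =====
def Spec_borders (sizeN : Int) (out : List Int × List Int × List Int × List Int) : Prop := out = borders_alt sizeN
instance (sizeN : Int) (out : List Int × List Int × List Int × List Int) : Decidable (Spec_borders sizeN out) := by unfold Spec_borders; infer_instance

-- ===== CLAIM (what is proved, stated in full; the proofs are below) =====
def Claim_equal_borders : Prop := ∀ (sizeN : Int), Dom_borders sizeN → Spec_borders sizeN (borders sizeN)

-- ===== LEMMAS AND PROOFS =====

-- A's second loop body, as a pair of independent conditional appends
theorem loop2_body_eq (sizeN : Int) :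
    (fun (st : List Int × List Int) i =>
        let st := if i < sizeN then (st.1 ++ [i], st.2) else st
        if i ≤ sizeN ^ 2 - 1 ∧ sizeN ^ 2 - sizeN ≤ i then (st.1, st.2 ++ [i]) else st)
    = (fun (st : List Int × List Int) i =>
        ((if i < sizeN then st.1 ++ [i] else st.1),
         (if i ≤ sizeN ^ 2 - 1 ∧ sizeN ^ 2 - sizeN ≤ i then st.2 ++ [i] else st.2))) := by
  funext st i
  dsimp only []
  split_ifs <;> rfl

theorem noUp_eq (sizeN : Int) (h : 0 < sizeN) :
    (PySem.List.pyRange 0 (sizeN ^ 2) 1).filter (fun i => decide (i < sizeN))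
      = PySem.List.pyRange 0 sizeN 1 := by
  rw [PySem.List.pyRange_one_append 0 sizeN (sizeN ^ 2) (by omega) (by nlinarith),
    List.filter_append, List.filter_eq_self.mpr, List.filter_eq_nil_iff.mpr, List.append_nil]
  · intro x hx
    have := PySem.List.mem_pyRange_one.mp hx
    simp; omega
  · intro x hx
    have := PySem.List.mem_pyRange_one.mp hx
    simp; omega

theorem noDown_eq (sizeN : Int) (h : 0 < sizeN) :
    (PySem.List.pyRange 0 (sizeN ^ 2) 1).filter
        (fun i => decide (i ≤ sizeN ^ 2 - 1 ∧ sizeN ^ 2 - sizeN ≤ i))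
      = PySem.List.pyRange (sizeN * sizeN - sizeN) (sizeN * sizeN) 1 := by
  have hsq : sizeN ^ 2 = sizeN * sizeN := by ring
  rw [PySem.List.pyRange_one_append 0 (sizeN ^ 2 - sizeN) (sizeN ^ 2) (by nlinarith) (by omega),
    List.filter_append, List.filter_eq_nil_iff.mpr, List.filter_eq_self.mpr, List.nil_append,
    hsq]
  · intro x hx
    have := PySem.List.mem_pyRange_one.mp hx
    simp; omega
  · intro x hx
    have := PySem.List.mem_pyRange_one.mp hx
    simp; omega

theorem noLeft_eq (sizeN : Int) (h : 0 < sizeN) :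
    (PySem.List.pyRange 0 sizeN 1).map (fun i => i * sizeN)
      = PySem.List.pyRange 0 (sizeN * sizeN) sizeN := by
  rw [PySem.List.pyRange_of_pos 0 (sizeN * sizeN) h, PySem.List.pyRange_one, List.map_map]
  have hif : (if (0:Int) < sizeN * sizeN then ((sizeN * sizeN - 0 + sizeN - 1) / sizeN).toNat else 0)
      = (sizeN - 0).toNat := by
    rw [if_pos (by nlinarith)]
    have : (sizeN * sizeN - 0 + sizeN - 1) / sizeN = sizeN := by
      have e : sizeN * sizeN - 0 + sizeN - 1 = (sizeN - 1) + sizeN * sizeN := by ring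
      rw [e, Int.add_mul_ediv_left _ _ (by omega), Int.ediv_eq_zero_of_lt (by omega) (by omega)]
      ring
    omega
  rw [hif]
  apply List.map_congr_left
  intro k _
  simp; ring

theorem noRight_eq (sizeN : Int) (h : 0 < sizeN) :
    (PySem.List.pyRange 0 sizeN 1).map (fun i => (sizeN - 1) + i * sizeN)
      = PySem.List.pyRange (sizeN - 1) (sizeN * sizeN) sizeN := by
  rw [PySem.List.pyRange_of_pos (sizeN - 1) (sizeN * sizeN) h, PySem.List.pyRange_one,
    List.map_map]
  have hif : (if sizeN - 1 < sizeN * sizeN then ((sizeN * sizeN - (sizeN - 1) + sizeN - 1) / sizeN).toNat else 0)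
      = (sizeN - 0).toNat := by
    rw [if_pos (by nlinarith)]
    have : (sizeN * sizeN - (sizeN - 1) + sizeN - 1) / sizeN = sizeN := by
      have e : sizeN * sizeN - (sizeN - 1) + sizeN - 1 = sizeN * sizeN := by ring
      rw [e, Int.mul_ediv_cancel _ (by omega)]
    omega
  rw [hif]
  apply List.map_congr_left
  intro k _
  simp; ring

-- ===== VERDICT (by name: the statement is the Claim_ definition above) =====
theorem borders_spec : Claim_equal_borders := by
  intro sizeN _
  unfold Spec_borders borders borders_alt
  simp only []
  rw [PySem.List.foldl_prod_mk (f := fun acc i => acc ++ [i * sizeN])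
        (g := fun acc i => acc ++ [(sizeN - 1) + i * sizeN]),
      loop2_body_eq sizeN,
      PySem.List.foldl_prod_mk (f := fun acc i => if i < sizeN then acc ++ [i] else acc)
        (g := fun acc i => if i ≤ sizeN ^ 2 - 1 ∧ sizeN ^ 2 - sizeN ≤ i then acc ++ [i] else acc)]
  rw [PySem.List.foldl_append_singleton_eq_map, PySem.List.foldl_append_singleton_eq_map,
      PySem.List.foldl_append_ite_eq_filter, PySem.List.foldl_append_ite_eq_filter]
  simp only [List.nil_append]
  by_cases hpos : sizeN ≤ 0
  · rw [if_pos hpos]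
    have h1 : PySem.List.pyRange 0 sizeN 1 = [] := PySem.List.pyRange_one_eq_nil hpos
    rw [h1]
    simp only [List.map_nil, Prod.mk.injEq]
    refine ⟨?_, trivial, ?_, trivial⟩
    · apply List.filter_eq_nil_iff.mpr
      intro x hx
      have hm := PySem.List.mem_pyRange_one.mp hx
      simp only [decide_eq_true_eq, not_lt]
      exact le_trans hpos hm.1
    · apply List.filter_eq_nil_iff.mpr
      intro x hx
      have hm := PySem.List.mem_pyRange_one.mp hx
      simp only [decide_eq_true_eq, not_and, not_le]
      intro _
      linarith [hm.2]
  · rw [not_le] at hpos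
    rw [if_neg (by omega)]
    simp only [Prod.mk.injEq]
    exact ⟨noUp_eq sizeN hpos, noRight_eq sizeN hpos, noDown_eq sizeN hpos, noLeft_eq sizeN hpos⟩
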